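-- pv_equiv track=rewrite | github.com/emmaweberyd/adventofcode2022 | 5/part1.py | create_stacks
-- ===== SOURCE A (Python) =====
-- def create_stacks(illustration):
--     grid = [list(line)[1::2][::2] for line in illustration]
--     res = []
--     for i in range(len(grid[0])):
--         res.append([])
--         for j in reversed(range(len(grid))):
--             if (grid[j][i] != ' '):
--                 res[i].append(grid[j][i])
--     return res
-- ===== SOURCE B (Python) =====
-- def create_stacks(illustration):
--     stacks = [[] for _ in illustration[0][1::4]]
--     for line in illustration:
--         row = line[1::4]
--         stacks = [s if row[i] == ' ' else [row[i]] + s for i, s in enumerate(stacks)]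
--     return stacks
-- ===== Notes on version B (the rewrite author's own statement) =====
-- stated objective: alternative
-- what changed: A pre-builds a grid via a double slice and fills each stack with column-major nested index loops (outer over columns, inner bottom-up over rows, appending); B never builds the grid: it makes one row-major top-to-bottom pass, slicing line[1::4] directly and rebuilding the stacks list each row by prepending every non-space crate to its stack.
import Mathlib
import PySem

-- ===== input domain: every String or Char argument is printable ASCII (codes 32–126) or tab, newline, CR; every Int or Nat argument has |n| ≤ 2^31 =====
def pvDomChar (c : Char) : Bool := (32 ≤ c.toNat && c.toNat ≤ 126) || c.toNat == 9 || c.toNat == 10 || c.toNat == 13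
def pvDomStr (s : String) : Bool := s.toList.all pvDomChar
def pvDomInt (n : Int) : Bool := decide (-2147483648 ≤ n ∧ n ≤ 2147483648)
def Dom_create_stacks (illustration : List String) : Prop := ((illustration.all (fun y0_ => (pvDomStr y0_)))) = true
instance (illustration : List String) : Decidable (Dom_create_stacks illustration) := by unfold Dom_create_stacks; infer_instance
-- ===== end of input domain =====

-- B replaces A's column-major nested index loops over a pre-built grid by a single row-major
-- top-to-bottom pass that prepends each non-space crate to its stack (slicing line[1::4] directly);
-- equality of return values is proved on Pre_.

-- ===== PORT A =====
-- list(line)[1::2][::2], A's crate-letter extraction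
def pvGridRow (line : String) : List Char :=
  (PySem.List.slice? ((PySem.List.slice? line.toList (some 1) none 2).getD []) none none 2).getD []

def create_stacks (illustration : List String) : List (List String) :=
  let grid := illustration.map pvGridRow
  (List.range (grid.headD []).length).foldl
    (fun res i =>
      res ++ [ (List.range grid.length).reverse.foldl
        (fun st j =>
          if (grid.getD j []).getD i ' ' ≠ ' ' then
            st ++ [String.ofList [(grid.getD j []).getD i ' ']]
          else st) [] ])
    []

-- ===== PORT B =====
-- line[1::4], B's crate-letter extraction
def pvRowB (line : String) : List Char :=
  (PySem.List.slice? line.toList (some 1) none 4).getD []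

def create_stacks_alt (illustration : List String) : List (List String) :=
  let stacks0 : List (List String) := (pvRowB (illustration.headD "")).map (fun _ => [])
  illustration.foldl
    (fun sts line =>
      let row := pvRowB line
      (PySem.List.enumerate sts).map
        (fun p => if PySem.List.pyGetD row p.1 ' ' = ' ' then p.2
                  else [String.ofList [PySem.List.pyGetD row p.1 ' ']] ++ p.2))
    stacks0

-- ===== PRECONDITION & SPEC =====
-- Pre_ is exactly the inputs on which A returns: a nonempty illustration whose every line's
-- extracted crate row is at least as long as the first line's (otherwise A raises IndexError).
def Pre_create_stacks (illustration : List String) : Prop :=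
  illustration ≠ [] ∧
  ∀ s ∈ illustration, (pvGridRow (illustration.headD "")).length ≤ (pvGridRow s).length
instance (illustration : List String) : Decidable (Pre_create_stacks illustration) := by
  unfold Pre_create_stacks; infer_instance

def pvWitness_create_stacks : List String := ["[D]    ", "[N] [C]", "[Z] [M]"]

def Spec_create_stacks (illustration : List String) (out : List (List String)) : Prop :=
  out = create_stacks_alt illustration
instance (illustration : List String) (out : List (List String)) : Decidable (Spec_create_stacks illustration out) := by
  unfold Spec_create_stacks; infer_instance

-- ===== CLAIM =====
def Claim_equal_create_stacks : Prop := ∀ (illustration : List String),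
  Dom_create_stacks illustration → Pre_create_stacks illustration →
  Spec_create_stacks illustration (create_stacks illustration)

-- ===== LEMMAS AND PROOFS =====

-- xs[1::4] as an explicit map over indices 1, 5, 9, …
lemma slice14 (xs : List Char) :
    (PySem.List.slice? xs (some 1) none 4).getD []
      = (List.range ((xs.length + 2) / 4)).map (fun k => xs.getD (1 + 4 * k) ' ') := by
  simp only [PySem.List.slice?, PySem.List.sliceIndices]
  norm_num
  have hs : min 1 (xs.length:Int) = if xs.length = 0 then 0 else 1 := by split <;> omega
  rw [hs]
  split
  · next h => simp [List.length_eq_zero_iff.mp h]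
  · next h =>
    have hc : (if 1 < xs.length then (((xs.length:Int) - 1 + 4 - 1) / 4).toNat else 0)
        = (xs.length + 2) / 4 := by split <;> omega
    rw [hc]
    rw [show (List.map (fun k => xs[1 + 4 * k]?.getD ' ') (List.range ((xs.length + 2) / 4)))
        = List.filterMap (fun k => some (xs[1 + 4 * k]?.getD ' ')) (List.range ((xs.length + 2) / 4))
        from (congrFun List.filterMap_eq_map.symm _)]
    apply List.filterMap_congr
    intro k hk
    rw [List.mem_range] at hk
    have ht : ((1:Int) + 4 * (k:Int)).toNat = 1 + 4 * k := by omega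
    have hlt : 1 + 4 * k < xs.length := by omega
    rw [ht, List.getElem?_eq_getElem hlt]
    simp

-- xs[1::2] as an explicit map over indices 1, 3, 5, …
lemma slice12 (xs : List Char) :
    (PySem.List.slice? xs (some 1) none 2).getD []
      = (List.range (xs.length / 2)).map (fun k => xs.getD (1 + 2 * k) ' ') := by
  simp only [PySem.List.slice?, PySem.List.sliceIndices]
  norm_num
  have hs : min 1 (xs.length:Int) = if xs.length = 0 then 0 else 1 := by split <;> omega
  rw [hs]
  split
  · next h => simp [List.length_eq_zero_iff.mp h]
  · next h =>
    have hc : (if 1 < xs.length then (((xs.length:Int) - 1 + 2 - 1) / 2).toNat else 0)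
        = xs.length / 2 := by split <;> omega
    rw [hc]
    rw [show (List.map (fun k => xs[1 + 2 * k]?.getD ' ') (List.range (xs.length / 2)))
        = List.filterMap (fun k => some (xs[1 + 2 * k]?.getD ' ')) (List.range (xs.length / 2))
        from (congrFun List.filterMap_eq_map.symm _)]
    apply List.filterMap_congr
    intro k hk
    rw [List.mem_range] at hk
    have ht : ((1:Int) + 2 * (k:Int)).toNat = 1 + 2 * k := by omega
    have hlt : 1 + 2 * k < xs.length := by omega
    rw [ht, List.getElem?_eq_getElem hlt]
    simp

-- xs[::2] as an explicit map over indices 0, 2, 4, …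
lemma slice02 (xs : List Char) :
    (PySem.List.slice? xs none none 2).getD []
      = (List.range ((xs.length + 1) / 2)).map (fun k => xs.getD (2 * k) ' ') := by
  simp only [PySem.List.slice?, PySem.List.sliceIndices]
  norm_num
  have hc : (if 0 < xs.length then (((xs.length:Int) + 2 - 1) / 2).toNat else 0)
      = (xs.length + 1) / 2 := by split <;> omega
  rw [hc]
  rw [show (List.map (fun k => xs[2 * k]?.getD ' ') (List.range ((xs.length + 1) / 2)))
      = List.filterMap (fun k => some (xs[2 * k]?.getD ' ')) (List.range ((xs.length + 1) / 2))
      from (congrFun List.filterMap_eq_map.symm _)]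
  apply List.filterMap_congr
  intro k hk
  rw [List.mem_range] at hk
  have ht : ((2:Int) * (k:Int)).toNat = 2 * k := by omega
  have hlt : 2 * k < xs.length := by omega
  rw [ht, List.getElem?_eq_getElem hlt]
  simp

lemma map_getD_range {α : Type} (l : List α) (d : α) :
    (List.range l.length).map (fun j => l.getD j d) = l := by
  apply List.ext_getElem
  · simp
  · intro i _ h2
    simp [List.getElem?_eq_getElem h2]

-- A's double slice and B's single slice extract the same crate row
lemma gridRow_eq_rowB (line : String) : pvGridRow line = pvRowB line := by
  unfold pvGridRow pvRowB
  rw [slice12, slice02, slice14]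
  simp only [List.length_map, List.length_range]
  apply List.ext_getElem
  · simp only [List.length_map, List.length_range]; omega
  · intro i h1 h2
    simp only [List.length_map, List.length_range] at h1 h2
    simp only [List.getElem_map, List.getElem_range]
    rw [PySem.List.getD_map_range _ _ _ _ (by omega)]
    congr 1
    omega

lemma filter_map_commute {α β γ : Type} (l : List α) (h : α → β) (p : β → Bool) (f : β → γ) :
    ((l.filter (fun x => p (h x))).map (fun x => f (h x)))
      = ((l.map h).filter p).map f := by
  rw [List.filter_map]; simp [List.map_map]; rfl

-- a prepend-if foldl builds the reversed filtered map
lemma foldl_cons_ite {α β : Type} (p : α → Prop) [DecidablePred p] (f : α → β)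
    (l : List α) (acc : List β) :
    l.foldl (fun s x => if p x then s else f x :: s) acc
      = ((l.filter (fun x => decide (¬ p x))).map f).reverse ++ acc := by
  induction l generalizing acc with
  | nil => simp
  | cons x xs ih =>
    simp only [List.foldl_cons, List.filter_cons]
    by_cases hx : p x <;> simp [hx, ih]

-- one row-step of B on a stacks list that is a map over range n
lemma stepB (n : Nat) (g : Nat → List String) (row : List Char) :
    (PySem.List.enumerate ((List.range n).map g)).map
        (fun p => if PySem.List.pyGetD row p.1 ' ' = ' ' then p.2
                  else [String.ofList [PySem.List.pyGetD row p.1 ' ']] ++ p.2)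
      = (List.range n).map
          (fun i => if row.getD i ' ' = ' ' then g i
                    else String.ofList [row.getD i ' '] :: g i) := by
  rw [PySem.List.enumerate_eq_map_pyRange _ ([] : List String)]
  simp only [PySem.List.len_eq, List.length_map, List.length_range]
  rw [PySem.List.pyRange_zero_nat n, List.map_map, List.map_map]
  apply List.map_congr_left
  intro k hk
  rw [List.mem_range] at hk
  simp only [Function.comp_apply, PySem.List.pyGetD_natCast]
  rw [PySem.List.getD_map_range _ _ _ _ hk]
  rfl

-- B's fold over the lines, column-wise
lemma foldB (L : List String) (n : Nat) (g : Nat → List String) :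
    L.foldl
      (fun sts line =>
        (PySem.List.enumerate sts).map
          (fun p => if PySem.List.pyGetD (pvRowB line) p.1 ' ' = ' ' then p.2
                    else [String.ofList [PySem.List.pyGetD (pvRowB line) p.1 ' ']] ++ p.2))
      ((List.range n).map g)
      = (List.range n).map
          (fun i => (L.map pvRowB).foldl
            (fun s r => if r.getD i ' ' = ' ' then s else String.ofList [r.getD i ' '] :: s)
            (g i)) := by
  induction L generalizing g with
  | nil => rfl
  | cons a t ih =>
    simp only [List.foldl_cons, List.map_cons]
    rw [stepB n g (pvRowB a), ih]

-- ===== VERDICT =====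
theorem create_stacks_spec : Claim_equal_create_stacks := by
  intro ill _ hpre
  obtain ⟨hne, hle⟩ := hpre
  obtain ⟨a, t, rfl⟩ := List.exists_cons_of_ne_nil hne
  simp only [List.headD_cons] at hle
  unfold Spec_create_stacks create_stacks create_stacks_alt
  dsimp only [List.map_cons, List.headD_cons]
  -- B's initial stacks as a map over range n
  have hinit : (pvRowB a).map (fun _ => ([] : List String))
      = (List.range (pvGridRow a).length).map (fun _ => ([] : List String)) := by
    rw [gridRow_eq_rowB]
    simp
  rw [hinit, foldB (a :: t) (pvGridRow a).length (fun _ => [])]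
  set G := pvGridRow a :: t.map pvGridRow with hG
  have hGB : (a :: t).map pvRowB = G := by
    simp only [hG, List.map_cons, gridRow_eq_rowB]
    congr 1
    exact (List.map_congr_left (fun s _ => (gridRow_eq_rowB s).symm))
  rw [hGB]
  rw [PySem.List.foldl_append_singleton_eq_map]
  rw [List.nil_append]
  apply List.map_congr_left
  intro i _
  -- A's column i
  rw [PySem.List.foldl_append_ite (p := fun j => (G.getD j []).getD i ' ' ≠ ' ')
        (f := fun j => String.ofList [(G.getD j []).getD i ' '])]
  rw [List.nil_append]
  rw [filter_map_commute ((List.range G.length).reverse)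
        (fun j => (G.getD j []).getD i ' ') (fun c => decide (c ≠ ' '))
        (fun c => String.ofList [c])]
  have hrows : (List.range G.length).reverse.map (fun j => (G.getD j []).getD i ' ')
      = G.reverse.map (fun r => r.getD i ' ') := by
    rw [List.map_reverse, List.map_reverse]
    congr 1
    calc (List.range G.length).map (fun j => (G.getD j []).getD i ' ')
        = ((List.range G.length).map (fun j => G.getD j [])).map (fun r => r.getD i ' ') := by
          rw [List.map_map]; rfl
      _ = G.map (fun r => r.getD i ' ') := by rw [map_getD_range G []]
  rw [hrows]
  -- B's column i
  rw [foldl_cons_ite (p := fun r : List Char => r.getD i ' ' = ' ')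
        (f := fun r => String.ofList [r.getD i ' '])]
  rw [List.append_nil]
  rw [filter_map_commute G (fun r => r.getD i ' ') (fun c => decide (¬ c = ' '))
        (fun c => String.ofList [c])]
  simp [List.map_reverse]
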